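-- pv_equiv track=rewrite | github.com/yinonkedem/Boggle | ex12_utils.py | _helper_find_n_paths
-- ===== SOURCE A (Python) =====
-- def _helper_find_n_paths(n, board_dict, word):
--     if n <= 0:
--         return [[]]
--     all_paths = []
--     if len(word) >= 1 and word[0] in board_dict:
--         short_paths = _helper_find_n_paths(n - 1, board_dict, word[1:])
--         for path in short_paths:
--             for letter in board_dict[word[0]]:
--                 concatenated_path = [letter] + path
--                 all_paths.append(concatenated_path)
--
--     if len(word) >= 2 and word[0:2] in board_dict:
--         short_paths = _helper_find_n_paths(n - 1, board_dict, word[2:])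
--         for path in short_paths:
--             for letter in board_dict[word[0:2]]:
--                 concatenated_path = [letter] + path
--                 all_paths.append(concatenated_path)
--
--     return all_paths
-- ===== SOURCE B (Python) =====
-- def _helper_find_n_paths(n, board_dict, word):
--     # Top-down DP memoized on (remaining budget, suffix start index): each
--     # subproblem is solved once instead of A's exponential recomputation.
--     memo = {}
--
--     def go(n, i):
--         if n <= 0:
--             return [[]]
--         key = (n, i)
--         if key in memo:
--             return memo[key]
--         paths = []
--         if i < len(word) and word[i:i + 1] in board_dict:
--             for path in go(n - 1, i + 1):
--                 for letter in board_dict[word[i:i + 1]]: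
--                     paths.append([letter] + path)
--         if len(word) - i >= 2 and word[i:i + 2] in board_dict:
--             for path in go(n - 1, i + 2):
--                 for letter in board_dict[word[i:i + 2]]:
--                     paths.append([letter] + path)
--         memo[key] = paths
--         return paths
--
--     return go(n, 0)
-- ===== Notes on version B (the rewrite author's own statement) =====
-- stated objective: alternative
-- what changed: A's plain recursion re-solves the same (budget, suffix-start) subproblem once per way of reaching it; B memoizes results in a dict keyed by (remaining budget, suffix start index) so each subproblem is computed once (intended as faster on recomputation-heavy inputs; a timing run could not consistently confirm a 1.5x speedup, so no speed is claimed).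
import Mathlib
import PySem

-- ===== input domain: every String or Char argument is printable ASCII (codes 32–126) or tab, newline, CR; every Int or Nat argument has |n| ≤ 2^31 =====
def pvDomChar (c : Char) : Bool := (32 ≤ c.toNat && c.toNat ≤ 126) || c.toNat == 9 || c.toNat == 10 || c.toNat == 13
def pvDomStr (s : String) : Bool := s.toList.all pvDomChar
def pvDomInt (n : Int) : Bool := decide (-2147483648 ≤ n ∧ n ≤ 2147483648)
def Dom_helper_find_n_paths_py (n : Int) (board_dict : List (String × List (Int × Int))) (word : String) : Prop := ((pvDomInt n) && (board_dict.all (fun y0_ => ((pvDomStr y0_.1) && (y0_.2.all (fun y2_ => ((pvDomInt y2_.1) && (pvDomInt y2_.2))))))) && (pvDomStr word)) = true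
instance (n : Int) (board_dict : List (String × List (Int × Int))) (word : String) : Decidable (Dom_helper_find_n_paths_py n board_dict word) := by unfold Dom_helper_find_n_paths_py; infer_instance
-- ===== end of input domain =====

-- B replaces A's plain recursion by a top-down DP memoized on (remaining budget, suffix start index), so each subproblem is computed once: objective = alternative.


-- shared dict primitive: Python's `key in board_dict` / `board_dict[key]` on the association list
-- (first match; the key is the slice of the word, held as a list of chars)
def pvLookup (bd : List (String × List (Int × Int))) (k : List Char) : Option (List (Int × Int)) :=
  match bd with
  | [] => none
  | (s, v) :: rest => if s.toList = k then some v else pvLookup rest k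

-- ===== PORT A =====
-- A's recursion on (n, word): two branches (1-char and 2-char head segment), results appended.
def goA (n : Int) (bd : List (String × List (Int × Int))) (w : List Char) : List (List (Int × Int)) :=
  if n ≤ 0 then [[]]
  else
    let p1 :=
      match w with
      | c :: rest =>
        match pvLookup bd [c] with
        | some letters =>
          (goA (n - 1) bd rest).foldl (fun acc path => acc ++ letters.map (fun l => l :: path)) []
        | none => []
      | [] => []
    let p2 :=
      match w with
      | c1 :: c2 :: rest =>
        match pvLookup bd [c1, c2] with
        | some letters =>
          (goA (n - 1) bd rest).foldl (fun acc path => acc ++ letters.map (fun l => l :: path)) []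
        | none => []
      | _ => []
    p1 ++ p2
termination_by w.length
decreasing_by all_goals simp

def helper_find_n_paths_py (n : Int) (board_dict : List (String × List (Int × Int))) (word : String) : List (List (Int × Int)) :=
  goA n board_dict word.toList

-- ===== PORT B =====
-- B's memoized recursion: `go(n, i)` over the suffix word[i:], threading the memo dict.
def goB (bd : List (String × List (Int × Int))) (w : List Char) (n : Int) (i : Nat)
    (memo : PySem.Dict (Int × Nat) (List (List (Int × Int)))) :
    List (List (Int × Int)) × PySem.Dict (Int × Nat) (List (List (Int × Int))) :=
  if n ≤ 0 then ([[]], memo)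
  else
    match memo.get? (n, i) with
    | some ps => (ps, memo)
    | none =>
      let s1 :=
        if _h1 : i < w.length then
          match pvLookup bd ((w.drop i).take 1) with
          | some letters =>
            let r := goB bd w (n - 1) (i + 1) memo
            (r.1.foldl (fun acc path => acc ++ letters.map (fun l => l :: path)) [], r.2)
          | none => ([], memo)
        else ([], memo)
      let s2 :=
        if _h2 : 2 ≤ w.length - i then
          match pvLookup bd ((w.drop i).take 2) with
          | some letters =>
            let r := goB bd w (n - 1) (i + 2) s1.2
            (s1.1 ++ r.1.foldl (fun acc path => acc ++ letters.map (fun l => l :: path)) [], r.2)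
          | none => (s1.1, s1.2)
        else (s1.1, s1.2)
      (s2.1, s2.2.insert (n, i) s2.1)
termination_by w.length - i
decreasing_by all_goals omega

def helper_find_n_paths_py_alt (n : Int) (board_dict : List (String × List (Int × Int))) (word : String) : List (List (Int × Int)) :=
  (goB board_dict word.toList n 0 PySem.Dict.empty).1

-- ===== PRECONDITION & SPEC =====
def Spec_helper_find_n_paths_py (n : Int) (board_dict : List (String × List (Int × Int))) (word : String) (out : List (List (Int × Int))) : Prop := out = helper_find_n_paths_py_alt n board_dict word
instance (n : Int) (board_dict : List (String × List (Int × Int))) (word : String) (out : List (List (Int × Int))) : Decidable (Spec_helper_find_n_paths_py n board_dict word out) := by unfold Spec_helper_find_n_paths_py; infer_instance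

-- ===== CLAIM (what is proved, stated in full; the proofs are below) =====
def Claim_equal_helper_find_n_paths_py : Prop := ∀ (n : Int) (board_dict : List (String × List (Int × Int))) (word : String), Dom_helper_find_n_paths_py n board_dict word → Spec_helper_find_n_paths_py n board_dict word (helper_find_n_paths_py n board_dict word)

-- ===== LEMMAS AND PROOFS =====

-- memo invariant: every stored entry is the corresponding value of A's recursion
def MemoOK (bd : List (String × List (Int × Int))) (w : List Char)
    (memo : PySem.Dict (Int × Nat) (List (List (Int × Int)))) : Prop :=
  ∀ n i v, memo.get? (n, i) = some v → v = goA n bd (w.drop i)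

-- goA on a suffix, phrased by index into w (matches goB's branching)
theorem goA_drop (n : Int) (bd : List (String × List (Int × Int))) (w : List Char) (i : Nat) :
    goA n bd (w.drop i) =
      if n ≤ 0 then [[]]
      else
        (if h : i < w.length then
           match pvLookup bd [w[i]] with
           | some letters =>
             (goA (n - 1) bd (w.drop (i + 1))).foldl (fun acc path => acc ++ letters.map (fun l => l :: path)) []
           | none => []
         else []) ++
        (if h : i + 1 < w.length then
           match pvLookup bd [w[i], w[i + 1]] with
           | some letters =>
             (goA (n - 1) bd (w.drop (i + 2))).foldl (fun acc path => acc ++ letters.map (fun l => l :: path)) []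
           | none => []
         else []) := by
  rw [goA.eq_def]
  by_cases hn : n ≤ 0
  · simp [hn]
  · simp only [hn, if_false]
    by_cases h1 : i < w.length
    · have hd1 : w.drop i = w[i] :: w.drop (i + 1) := List.drop_eq_getElem_cons h1
      by_cases h2 : i + 1 < w.length
      · have hd2 : w.drop (i + 1) = w[i + 1] :: w.drop (i + 2) := List.drop_eq_getElem_cons h2
        rw [hd1, hd2]
        simp [h1, h2]
      · have hd2 : w.drop (i + 1) = [] := List.drop_eq_nil_of_le (by omega)
        rw [hd1, hd2]
        simp [h1, h2]
    · have hd1 : w.drop i = [] := List.drop_eq_nil_of_le (by omega)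
      rw [hd1]
      simp [h1, show ¬ (i + 1 < w.length) by omega]

theorem key1_take (w : List Char) (i : Nat) (h : i < w.length) : (w.drop i).take 1 = [w[i]] := by
  rw [List.drop_eq_getElem_cons h]; rfl

theorem key2_take (w : List Char) (i : Nat) (h : i + 1 < w.length) :
    (w.drop i).take 2 = [w[i], w[i + 1]] := by
  rw [List.drop_eq_getElem_cons (by omega : i < w.length), List.drop_eq_getElem_cons h]; rfl

theorem memoOK_insert (bd : List (String × List (Int × Int))) (w : List Char)
    (memo : PySem.Dict (Int × Nat) (List (List (Int × Int)))) (hm : MemoOK bd w memo)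
    (n : Int) (i : Nat) (v : List (List (Int × Int))) (hv : v = goA n bd (w.drop i)) :
    MemoOK bd w (memo.insert (n, i) v) := by
  intro n' i' u hu
  rw [PySem.Dict.get?_insert] at hu
  split at hu
  · next heq =>
    cases hu
    obtain ⟨rfl, rfl⟩ := Prod.mk.injEq .. ▸ heq
    exact hv
  · exact hm n' i' u hu

theorem goB_correct_aux (d : Nat) : ∀ (bd : List (String × List (Int × Int))) (w : List Char) (n : Int) (i : Nat)
    (memo : PySem.Dict (Int × Nat) (List (List (Int × Int)))), w.length - i ≤ d → MemoOK bd w memo →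
    (goB bd w n i memo).1 = goA n bd (w.drop i) ∧ MemoOK bd w (goB bd w n i memo).2 := by
  induction d using Nat.strong_induction_on with
  | _ d ih =>
  intro bd w n i memo hle hm
  rw [goB]
  by_cases hn : n ≤ 0
  · refine ⟨?_, by simp [hn]; exact hm⟩
    rw [goA_drop]; simp [hn]
  · simp only [hn, if_false]
    cases hget : memo.get? (n, i) with
    | some ps => exact ⟨(hm n i ps hget), hm⟩
    | none =>
      -- branch 1
      have step1 :
          ∃ p1 m1, (if _h1 : i < w.length then
              match pvLookup bd ((w.drop i).take 1) with
              | some letters =>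
                let r := goB bd w (n - 1) (i + 1) memo
                (r.1.foldl (fun acc path => acc ++ letters.map (fun l => l :: path)) [], r.2)
              | none => ([], memo)
            else ([], memo)) = (p1, m1) ∧
            p1 = (if _ : i < w.length then
              match pvLookup bd [w[i]] with
              | some letters =>
                (goA (n - 1) bd (w.drop (i + 1))).foldl (fun acc path => acc ++ letters.map (fun l => l :: path)) []
              | none => []
            else []) ∧ MemoOK bd w m1 := by
        by_cases h1 : i < w.length
        · rw [key1_take w i h1]
          cases hpv : pvLookup bd [w[i]] with
          | some letters =>
            obtain ⟨e1, m1ok⟩ := ih (d - 1) (by omega) bd w (n - 1) (i + 1) memo (by omega) hm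
            refine ⟨(goB bd w (n - 1) (i + 1) memo).1.foldl (fun acc path => acc ++ letters.map (fun l => l :: path)) [],
                    (goB bd w (n - 1) (i + 1) memo).2, ?_, ?_, m1ok⟩
            · simp only [dif_pos h1]
            · simp only [dif_pos h1, hpv, e1]
          | none =>
            refine ⟨[], memo, ?_, ?_, hm⟩
            · simp only [dif_pos h1]
            · simp only [dif_pos h1, hpv]
        · exact ⟨[], memo, by simp [h1], by simp [h1], hm⟩
      obtain ⟨p1, m1, hs1, hp1, hm1⟩ := step1
      rw [hs1]
      -- branch 2
      have hc2 : (2 ≤ w.length - i) ↔ (i + 1 < w.length) := by omega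
      have step2 :
          ∃ p2 m2, (if _h2 : 2 ≤ w.length - i then
              match pvLookup bd ((w.drop i).take 2) with
              | some letters =>
                let r := goB bd w (n - 1) (i + 2) (p1, m1).2
                ((p1, m1).1 ++ r.1.foldl (fun acc path => acc ++ letters.map (fun l => l :: path)) [], r.2)
              | none => ((p1, m1).1, (p1, m1).2)
            else ((p1, m1).1, (p1, m1).2)) = (p2, m2) ∧
            p2 = p1 ++ (if _ : i + 1 < w.length then
              match pvLookup bd [w[i], w[i + 1]] with
              | some letters =>
                (goA (n - 1) bd (w.drop (i + 2))).foldl (fun acc path => acc ++ letters.map (fun l => l :: path)) []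
              | none => []
            else []) ∧ MemoOK bd w m2 := by
        by_cases h2 : i + 1 < w.length
        · rw [key2_take w i h2]
          cases hpv : pvLookup bd [w[i], w[i + 1]] with
          | some letters =>
            obtain ⟨e2, m2ok⟩ := ih (d - 1) (by omega) bd w (n - 1) (i + 2) m1 (by omega) hm1
            refine ⟨p1 ++ (goB bd w (n - 1) (i + 2) m1).1.foldl (fun acc path => acc ++ letters.map (fun l => l :: path)) [],
                    (goB bd w (n - 1) (i + 2) m1).2, ?_, ?_, m2ok⟩
            · simp only [dif_pos (hc2.mpr h2)]
            · simp only [dif_pos h2, hpv, e2]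
          | none =>
            refine ⟨p1, m1, ?_, ?_, hm1⟩
            · simp only [dif_pos (hc2.mpr h2)]
            · simp only [dif_pos h2, hpv, List.append_nil]
        · refine ⟨p1, m1, ?_, ?_, hm1⟩
          · simp only [dif_neg (by omega : ¬ 2 ≤ w.length - i)]
          · simp only [dif_neg h2, List.append_nil]
      obtain ⟨p2, m2, hs2, hp2, hm2⟩ := step2
      rw [hs2]
      have hval : p2 = goA n bd (w.drop i) := by
        rw [goA_drop]
        simp only [hn, if_false]
        rw [hp2, hp1]
      exact ⟨hval, memoOK_insert bd w m2 hm2 n i p2 hval⟩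

-- ===== VERDICT (by name: the statement is the Claim_ definition above) =====
theorem helper_find_n_paths_py_spec : Claim_equal_helper_find_n_paths_py := by
  intro n bd word _
  unfold Spec_helper_find_n_paths_py helper_find_n_paths_py helper_find_n_paths_py_alt
  have h := goB_correct_aux word.toList.length bd word.toList n 0 PySem.Dict.empty (by omega)
    (by intro n i v hv; simp [PySem.Dict.get?_empty] at hv)
  simpa using h.1.symm
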